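-- pv_equiv track=rewrite | github.com/Mark2797/2048_AI_Game_Solver | PlayerAI_3.py | loc_penalty
-- ===== SOURCE A (Python) =====
-- def loc_penalty(board):
--     middle = [(1,1), (1,2), (2,1), (2,2)]
--     smalls = [2, 4, 8, 16]
--
--     output = 0
--     for j in range(4):
--         for i in range(4):
--             if (board[i][j] == 0):
--                 continue
--
--             if ((i,j) in middle) and not (board[i][j] in smalls):	# penalize if there are large values in the middle coords
--                 output += 1
--             if not ((i,j) in middle) and (board[i][j] in smalls):	# penalize if there are small values in the outer coords
--                 output += 1
--     return output
-- ===== SOURCE B (Python) =====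
-- def loc_penalty(board):
--     smalls = (2, 4, 8, 16)
--
--     pen = 0
--     # inner 2x2 block: penalize non-zero values that are not small
--     for i in range(1, 3):
--         for j in range(1, 3):
--             v = board[i][j]
--             if v != 0 and v not in smalls:
--                 pen += 1
--     # border cells: penalize small values (zeros are never small)
--     for i in range(4):
--         for j in range(4):
--             if i == 0 or i == 3 or j == 0 or j == 3:
--                 if board[i][j] in smalls:
--                     pen += 1
--     return pen
-- ===== Notes on version B (the rewrite author's own statement) =====
-- stated objective: alternative
-- what changed: B replaces A's single column-major 4x4 scan with a per-cell region-membership test by two region-specific passes: one over the inner 2x2 block and one over the border cells, dropping the zero-skip in the border pass (0 is never a small value).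
import Mathlib
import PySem

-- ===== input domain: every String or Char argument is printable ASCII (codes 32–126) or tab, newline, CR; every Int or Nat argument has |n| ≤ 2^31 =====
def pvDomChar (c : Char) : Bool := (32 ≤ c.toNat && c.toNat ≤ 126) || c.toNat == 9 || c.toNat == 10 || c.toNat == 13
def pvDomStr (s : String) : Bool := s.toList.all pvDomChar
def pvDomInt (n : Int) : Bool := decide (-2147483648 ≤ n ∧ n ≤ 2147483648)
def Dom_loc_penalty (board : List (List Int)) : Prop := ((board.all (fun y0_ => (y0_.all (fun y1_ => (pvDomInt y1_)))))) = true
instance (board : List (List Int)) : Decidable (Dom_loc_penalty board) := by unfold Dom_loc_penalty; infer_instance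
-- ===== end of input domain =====

-- B replaces A's single column-major scan with membership tests by two region-specific passes
-- (inner 2x2 block, then border cells); alternative decomposition, same O(1) cost.


-- ===== PORT A =====
-- board[i][j]; the .getD defaults are only reached outside Pre_ (Python raises IndexError there)
def pvCell (board : List (List Int)) (i j : Int) : Int :=
  (PySem.List.pyGet? ((PySem.List.pyGet? board i).getD []) j).getD 0

def pvMiddle : List (Int × Int) := [(1,1), (1,2), (2,1), (2,2)]
def pvSmalls : List Int := [2, 4, 8, 16]

-- loop body of A's inner 'for i' loop (continue → early return of the accumulator)
def pvStepA (board : List (List Int)) (output : Int) (i j : Int) : Int :=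
  if pvCell board i j = 0 then output
  else
    let output := if (i, j) ∈ pvMiddle ∧ ¬ pvCell board i j ∈ pvSmalls then output + 1 else output
    if ¬ (i, j) ∈ pvMiddle ∧ pvCell board i j ∈ pvSmalls then output + 1 else output

def loc_penalty (board : List (List Int)) : Int :=
  (PySem.List.pyRange 0 4 1).foldl (fun output j =>
    (PySem.List.pyRange 0 4 1).foldl (fun output i => pvStepA board output i j) output) 0

-- ===== PORT B =====
def loc_penalty_alt (board : List (List Int)) : Int :=
  let pen :=
    (PySem.List.pyRange 1 3 1).foldl (fun pen i =>
      (PySem.List.pyRange 1 3 1).foldl (fun pen j =>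
        if pvCell board i j ≠ 0 ∧ ¬ pvCell board i j ∈ pvSmalls then pen + 1 else pen) pen) 0
  (PySem.List.pyRange 0 4 1).foldl (fun pen i =>
    (PySem.List.pyRange 0 4 1).foldl (fun pen j =>
      if i = 0 ∨ i = 3 ∨ j = 0 ∨ j = 3 then
        (if pvCell board i j ∈ pvSmalls then pen + 1 else pen)
      else pen) pen) pen

-- ===== PRECONDITION & SPEC =====
-- Pre_ excludes exactly the boards on which A raises IndexError: fewer than 4 rows,
-- or one of the first 4 rows shorter than 4.
def Pre_loc_penalty (board : List (List Int)) : Prop :=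
  4 ≤ board.length ∧ ∀ r ∈ board.take 4, 4 ≤ r.length
instance (board : List (List Int)) : Decidable (Pre_loc_penalty board) := by
  unfold Pre_loc_penalty; infer_instance

def pvWitness_loc_penalty : List (List Int) :=
  [[2, 0, 0, 4], [0, 32, 2, 0], [0, 64, 8, 0], [16, 0, 0, 2]]

def Spec_loc_penalty (board : List (List Int)) (out : Int) : Prop := out = loc_penalty_alt board
instance (board : List (List Int)) (out : Int) : Decidable (Spec_loc_penalty board out) := by unfold Spec_loc_penalty; infer_instance

-- ===== CLAIM (what is proved, stated in full; the proofs are below) =====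
def Claim_equal_loc_penalty : Prop := ∀ (board : List (List Int)), Dom_loc_penalty board → Pre_loc_penalty board → Spec_loc_penalty board (loc_penalty board)

-- ===== LEMMAS AND PROOFS =====
-- per-cell contribution of A's loop body
def pvCA (board : List (List Int)) (i j : Int) : Int :=
  if pvCell board i j = 0 then 0
  else (if (i, j) ∈ pvMiddle ∧ ¬ pvCell board i j ∈ pvSmalls then 1 else 0)
     + (if ¬ (i, j) ∈ pvMiddle ∧ pvCell board i j ∈ pvSmalls then 1 else 0)

theorem pvStepA_eq (board : List (List Int)) (output i j : Int) :
    pvStepA board output i j = output + pvCA board i j := by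
  simp only [pvStepA, pvCA]
  split_ifs <;> omega

theorem pv_ite_add (c : Prop) [Decidable c] (x t : Int) :
    (if c then x + t else x) = x + (if c then t else 0) := by
  split_ifs <;> omega

theorem pvCA_mid (board : List (List Int)) (i j : Int) (h : (i, j) ∈ pvMiddle) :
    pvCA board i j =
      if pvCell board i j ≠ 0 ∧ ¬ pvCell board i j ∈ pvSmalls then 1 else 0 := by
  simp only [pvCA, h]
  split_ifs <;> simp_all

theorem pvCA_out (board : List (List Int)) (i j : Int) (h : ¬ (i, j) ∈ pvMiddle) :
    pvCA board i j = if pvCell board i j ∈ pvSmalls then 1 else 0 := by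
  simp only [pvCA, h]
  have h0 : (0 : Int) ∉ pvSmalls := by decide
  split_ifs with h1 h2 h3 <;> simp_all

theorem pv_equiv (board : List (List Int)) : loc_penalty board = loc_penalty_alt board := by
  have r04 : PySem.List.pyRange 0 4 1 = [0, 1, 2, 3] := by decide
  have r13 : PySem.List.pyRange 1 3 1 = [1, 2] := by decide
  simp only [loc_penalty, loc_penalty_alt, r04, r13, List.foldl, pvStepA_eq, pv_ite_add]
  rw [pvCA_mid board 1 1 (by decide), pvCA_mid board 1 2 (by decide),
      pvCA_mid board 2 1 (by decide), pvCA_mid board 2 2 (by decide),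
      pvCA_out board 0 0 (by decide), pvCA_out board 1 0 (by decide),
      pvCA_out board 2 0 (by decide), pvCA_out board 3 0 (by decide),
      pvCA_out board 0 1 (by decide), pvCA_out board 3 1 (by decide),
      pvCA_out board 0 2 (by decide), pvCA_out board 3 2 (by decide),
      pvCA_out board 0 3 (by decide), pvCA_out board 1 3 (by decide),
      pvCA_out board 2 3 (by decide), pvCA_out board 3 3 (by decide)]
  norm_num
  ring

-- ===== VERDICT (by name: the statement is the Claim_ definition above) =====
theorem loc_penalty_spec : Claim_equal_loc_penalty := by
  intro board _ _
  exact pv_equiv board
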